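-- pv_equiv track=rewrite | github.com/pihelper/pi-bot-master | sites/sparkfun.py | get_shipping_method
-- ===== SOURCE A (Python) =====
-- def get_shipping_method(text):
--     method_text = text.replace('\\n', '\n')
--     methods = []
--     for link in method_text.splitlines():
--         if 'ship_immediately_' in link:
--             methods.append(link.replace('"', ''))
--     cheapest_method = methods[len(methods) - 1]
--     return cheapest_method[cheapest_method.rfind("_") + 1:].replace('\\','')
-- ===== SOURCE B (Python) =====
-- def get_shipping_method(text):
--     for line in reversed(text.replace('\\n', '\n').splitlines()):
--         if 'ship_immediately_' in line:
--             line = line.replace('"', '')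
--             return line[line.rfind('_') + 1:].replace('\\', '')
-- ===== Notes on version B (the rewrite author's own statement) =====
-- stated objective: alternative
-- what changed: Instead of accumulating all matching lines in a list and indexing its last element, B scans the split lines in reverse and returns the processed code from the first match it sees, never building the list; Pre_ excludes inputs with no line containing 'ship_immediately_', where A raises IndexError.
import Mathlib
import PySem

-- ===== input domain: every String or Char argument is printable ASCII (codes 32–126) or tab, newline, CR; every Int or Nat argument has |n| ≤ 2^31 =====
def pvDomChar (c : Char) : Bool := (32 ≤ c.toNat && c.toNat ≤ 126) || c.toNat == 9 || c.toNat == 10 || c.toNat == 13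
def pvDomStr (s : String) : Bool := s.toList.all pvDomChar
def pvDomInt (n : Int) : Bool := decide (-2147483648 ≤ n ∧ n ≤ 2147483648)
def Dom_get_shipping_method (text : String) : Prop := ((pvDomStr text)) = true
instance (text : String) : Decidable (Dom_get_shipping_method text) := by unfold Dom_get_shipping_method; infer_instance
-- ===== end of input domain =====

-- B scans the split lines in reverse and returns the processed code of the first
-- match, instead of collecting every matching line in a list and indexing the last
-- (alternative decomposition, same cost).


-- ===== PORT A =====
def get_shipping_method (text : String) : String :=
  let method_text := PySem.Str.replace text "\\n" "\n"
  let methods := (PySem.Str.splitlines method_text).foldl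
    (fun acc link =>
      if PySem.Str.isIn "ship_immediately_" link then acc ++ [PySem.Str.replace link "\"" ""]
      else acc) []
  match PySem.List.pyGet? methods ((methods.length : Int) - 1) with
  | none => ""   -- IndexError in Python; excluded by Pre_
  | some cheapest_method =>
      PySem.Str.replace
        (PySem.Str.slice cheapest_method (some (PySem.Str.rfind cheapest_method "_" + 1)) none)
        "\\" ""

-- ===== PORT B =====
-- processing of the first matching line found by the reverse scan
def pvProcessLine (line : String) : String :=
  let l := PySem.Str.replace line "\"" ""
  PySem.Str.replace (PySem.Str.slice l (some (PySem.Str.rfind l "_" + 1)) none) "\\" ""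

-- the reverse loop of Source B: first line containing the marker wins
def pvScan : List String → String
  | [] => ""   -- Source B falls off the loop here (no value); excluded by Pre_
  | line :: rest =>
      if PySem.Str.isIn "ship_immediately_" line then pvProcessLine line else pvScan rest

def get_shipping_method_alt (text : String) : String :=
  pvScan (PySem.Str.splitlines (PySem.Str.replace text "\\n" "\n")).reverse

-- ===== PRECONDITION & SPEC =====
-- Pre_ excludes exactly the inputs with no line containing 'ship_immediately_':
-- there A raises IndexError (and B returns no string).
def Pre_get_shipping_method (text : String) : Prop :=
  ∃ l ∈ PySem.Str.splitlines (PySem.Str.replace text "\\n" "\n"),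
    PySem.Str.isIn "ship_immediately_" l = true
instance (text : String) : Decidable (Pre_get_shipping_method text) := by
  unfold Pre_get_shipping_method; infer_instance

def pvWitness_get_shipping_method : String := "\"ship_immediately_ups\""

def Spec_get_shipping_method (text : String) (out : String) : Prop := out = get_shipping_method_alt text
instance (text : String) (out : String) : Decidable (Spec_get_shipping_method text out) := by unfold Spec_get_shipping_method; infer_instance

-- ===== CLAIM (what is proved, stated in full; the proofs are below) =====
def Claim_equal_get_shipping_method : Prop := ∀ (text : String), Dom_get_shipping_method text → Pre_get_shipping_method text → Spec_get_shipping_method text (get_shipping_method text)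

-- ===== LEMMAS AND PROOFS =====

theorem pv_getLast?_cons {α : Type} (a : α) (t : List α) :
    (a :: t).getLast? = t.getLast?.or (some a) := by
  cases t with
  | nil => rfl
  | cons c ts =>
      rw [List.getLast?_cons_cons]
      cases h : (c :: ts).getLast? with
      | none => simp at h
      | some x => rfl

-- indexing methods[len(methods)-1] is getLast? (none on the empty list: index -1)
theorem pv_pyGet_last {α : Type} (m : List α) :
    PySem.List.pyGet? m ((m.length : Int) - 1) = m.getLast? := by
  cases m with
  | nil => rfl
  | cons a t =>
      have h : ((a :: t).length : Int) - 1 = ((t.length : Nat) : Int) := by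
        simp
      rw [h, PySem.List.pyGet?_natCast, List.getLast?_eq_getElem?]
      simp

-- the reverse-scan first match is the last element of the filtered list
theorem pv_find?_reverse {α : Type} (p : α → Bool) (l : List α) :
    l.reverse.find? p = (l.filter p).getLast? := by
  induction l with
  | nil => rfl
  | cons a t ih =>
      rw [List.reverse_cons, List.find?_append, ih, List.filter_cons]
      by_cases hp : p a = true
      · simp [hp, pv_getLast?_cons]
      · simp [hp, List.find?]

-- pvScan returns the processed first match, "" if none
theorem pv_scan_eq (ls : List String) :
    pvScan ls = ((ls.find? (fun l => PySem.Str.isIn "ship_immediately_" l)).map pvProcessLine).getD "" := by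
  induction ls with
  | nil => rfl
  | cons a t ih =>
      by_cases hp : PySem.Str.isIn "ship_immediately_" a = true
      · rw [pvScan, if_pos hp, List.find?_cons_of_pos hp]; rfl
      · rw [pvScan, if_neg hp, ih, List.find?_cons_of_neg hp]

theorem pv_eq_everywhere (text : String) :
    get_shipping_method text = get_shipping_method_alt text := by
  unfold get_shipping_method get_shipping_method_alt
  dsimp only
  rw [PySem.List.foldl_append_if, pv_scan_eq, pv_find?_reverse]
  simp only [List.nil_append, pv_pyGet_last, List.getLast?_map]
  cases h : (List.filter (fun l => PySem.Str.isIn "ship_immediately_" l)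
      (PySem.Str.splitlines (PySem.Str.replace text "\\n" "\n"))).getLast? <;>
    simp [pvProcessLine]

-- ===== VERDICT (by name: the statement is the Claim_ definition above) =====
theorem get_shipping_method_spec : Claim_equal_get_shipping_method := by
  intro text _ _
  unfold Spec_get_shipping_method
  exact pv_eq_everywhere text
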